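-- pv_equiv track=rewrite | github.com/hassanabdelhalim23/Security-algorithms- | algos/hill.py | text_to_numeric
-- ===== SOURCE A (Python) =====
-- def text_to_numeric(text, dividend):
--     counter = 0
--     result = []
--     for i in range(0, int(round(len(text) / float(dividend)))):
--         z = []
--         for j in range(0, dividend):
--             try:
--                z.insert(j, ord(text[counter]) - 97)
--             except IndexError:
--                 z.insert(j, 0)
--             counter += 1
--         result.insert(i, z)
--     return result
-- ===== SOURCE B (Python) =====
-- def text_to_numeric(text, dividend):
--     n = int(round(len(text) / float(dividend)))
--     nums = [ord(c) - 97 for c in text]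
--     result = []
--     for i in range(n):
--         chunk = nums[i * dividend:(i + 1) * dividend]
--         result.append(chunk + [0] * (dividend - len(chunk)))
--     return result
-- ===== Notes on version B (the rewrite author's own statement) =====
-- stated objective: simpler
-- what changed: Replaces A's running character counter with per-character try/except IndexError padding inside nested loops by a two-phase structure: convert the whole text to numbers once in a comprehension, then take each group as a slice and right-pad it with zeros arithmetically (no per-character exception machinery).
import Mathlib
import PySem

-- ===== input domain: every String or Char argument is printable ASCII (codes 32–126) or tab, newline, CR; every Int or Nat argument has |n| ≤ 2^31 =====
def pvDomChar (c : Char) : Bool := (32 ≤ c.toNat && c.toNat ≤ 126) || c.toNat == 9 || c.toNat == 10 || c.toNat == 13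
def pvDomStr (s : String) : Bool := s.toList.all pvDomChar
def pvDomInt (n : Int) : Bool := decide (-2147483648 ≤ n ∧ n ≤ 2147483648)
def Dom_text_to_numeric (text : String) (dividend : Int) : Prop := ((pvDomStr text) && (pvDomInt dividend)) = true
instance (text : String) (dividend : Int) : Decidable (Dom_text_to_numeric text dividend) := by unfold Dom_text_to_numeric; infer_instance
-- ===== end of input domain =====

-- B replaces A's global counter with try/except padding by convert-once, then slice-and-pad per group (objective: simpler).

-- ===== PORT A =====
-- Port of `int(round(L / float(d)))` (d ≠ 0): round-half-to-even of the exact rational L/d,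
-- computed in integer arithmetic; exact where the float quotient rounds to the same integer,
-- in particular for |L|, |d| ≤ 2^31 with |L| far below 2^52.
def pyRoundDiv (L d : Int) : Int :=
  let f := PySem.Int.floordiv L d
  let r := L - f * d
  let t := 2 * r.natAbs
  let m := d.natAbs
  if t < m then f
  else if m < t then f + 1
  else if f % 2 = 0 then f else f + 1

def text_to_numeric (text : String) (dividend : Int) : List (List Int) :=
  ((PySem.List.pyRange 0 (pyRoundDiv (PySem.Str.len text) dividend)).foldl
    (fun (st : Int × List (List Int)) (_i : Int) =>
      let z := (PySem.List.pyRange 0 dividend).foldl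
        (fun (p : Int × List Int) (_j : Int) =>
          (p.1 + 1,
           p.2 ++ [match PySem.Str.pyGet? text p.1 with
                   | some c => (c.toNat : Int) - 97
                   | none => 0]))
        (st.1, ([] : List Int))
      (z.1, st.2 ++ [z.2]))
    (0, ([] : List (List Int)))).2

-- ===== PORT B =====
def text_to_numeric_alt (text : String) (dividend : Int) : List (List Int) :=
  let nums := text.toList.map (fun c => (c.toNat : Int) - 97)
  (List.range (pyRoundDiv (PySem.Str.len text) dividend).toNat).map (fun (i : Nat) =>
    let chunk := PySem.List.slice nums (some ((i : Int) * dividend)) (some (((i : Int) + 1) * dividend))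
    chunk ++ List.replicate ((dividend - (chunk.length : Int)).toNat) 0)

-- ===== PRECONDITION & SPEC =====
-- A raises ZeroDivisionError when dividend = 0; that is all Pre_ excludes.
def Pre_text_to_numeric (text : String) (dividend : Int) : Prop := dividend ≠ 0
instance (text : String) (dividend : Int) : Decidable (Pre_text_to_numeric text dividend) := by unfold Pre_text_to_numeric; infer_instance
def pvWitness_text_to_numeric : String × Int := ("hello", 2)

def Spec_text_to_numeric (text : String) (dividend : Int) (out : List (List Int)) : Prop := out = text_to_numeric_alt text dividend
instance (text : String) (dividend : Int) (out : List (List Int)) : Decidable (Spec_text_to_numeric text dividend out) := by unfold Spec_text_to_numeric; infer_instance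

-- ===== CLAIM (what is proved, stated in full; the proofs are below) =====
def Claim_equal_text_to_numeric : Prop := ∀ (text : String) (dividend : Int), Dom_text_to_numeric text dividend → Pre_text_to_numeric text dividend → Spec_text_to_numeric text dividend (text_to_numeric text dividend)

-- ===== LEMMAS AND PROOFS =====

theorem pyRoundDiv_nonpos (L d : Int) (hL : 0 ≤ L) (hd : d < 0) : pyRoundDiv L d ≤ 0 := by
  unfold pyRoundDiv
  dsimp only
  have hmod := PySem.Int.mod_neg_bounds L hd
  have heq := PySem.Int.floordiv_mul_add_mod L d
  set f := PySem.Int.floordiv L d with hf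
  have hfle : f ≤ 0 := by nlinarith [hmod.1, hmod.2]
  rcases lt_or_eq_of_le hfle with h1 | h1
  · split_ifs <;> omega
  · have hLz : L = 0 := by
      have : f * d = 0 := by rw [h1]; ring
      omega
    have hm : 0 < d.natAbs := Int.natAbs_pos.mpr (by omega)
    have ht : (L - f * d).natAbs = 0 := by
      have : f * d = 0 := by rw [h1]; ring
      omega
    split_ifs <;> omega

theorem pyRange_nonpos (n : Int) (h : n ≤ 0) : PySem.List.pyRange 0 n = [] := by
  simp [PySem.List.pyRange]
  omega

-- right-padded chunk as a pointwise-getD map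
theorem pad_eq (xs : List Int) (k : Nat) :
    (List.range k).map (fun j => (xs[j]?).getD 0)
      = xs.take k ++ List.replicate (k - (xs.take k).length) 0 := by
  induction xs generalizing k with
  | nil => simp [List.map_const']
  | cons y t ih =>
    cases k with
    | zero => simp
    | succ k' =>
      simp [List.range_succ_eq_map, List.map_map, Function.comp_def, ih k']

-- inner loop of A: appends d' looked-up-or-zero values, advances the counter by d'
theorem inner_eq (text : String) (d' : Nat) (c : Nat) (acc : List Int) :
    (PySem.List.pyRange 0 (d' : Int)).foldl
      (fun (p : Int × List Int) (_j : Int) =>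
        (p.1 + 1,
         p.2 ++ [match PySem.Str.pyGet? text p.1 with
                 | some ch => (ch.toNat : Int) - 97
                 | none => 0]))
      ((c : Int), acc)
    = ((c : Int) + (d' : Int),
       acc ++ (List.range d').map (fun j =>
         (((text.toList.map (fun ch => (ch.toNat : Int) - 97))[c + j]?).getD 0))) := by
  rw [PySem.List.pyRange_zero_natCast, List.foldl_map]
  induction d' with
  | zero => simp
  | succ n ih =>
    rw [List.range_succ, List.foldl_append, ih]
    have hcast : ((c : Int) + (n : Int)) = ((c + n : Nat) : Int) := by push_cast; ring
    simp only [List.foldl_cons, List.foldl_nil, hcast, PySem.Str.pyGet?_natCast]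
    refine Prod.ext ?_ ?_
    · show ((c + n : Nat) : Int) + 1 = (c : Int) + ((n + 1 : Nat) : Int)
      push_cast; ring
    · show acc ++ _ ++ _ = acc ++ _
      rw [List.map_append, ← List.append_assoc]
      congr 1
      simp only [List.map_cons, List.map_nil]
      congr 1
      rw [List.getElem?_map]
      cases text.toList[c + n]? <;> simp

-- outer loop of A
theorem outer_eq (text : String) (d' : Nat) (m : Nat) :
    ((PySem.List.pyRange 0 ((m : Nat) : Int)).foldl
      (fun (st : Int × List (List Int)) (_i : Int) =>
        let z := (PySem.List.pyRange 0 ((d' : Nat) : Int)).foldl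
          (fun (p : Int × List Int) (_j : Int) =>
            (p.1 + 1,
             p.2 ++ [match PySem.Str.pyGet? text p.1 with
                     | some ch => (ch.toNat : Int) - 97
                     | none => 0]))
          (st.1, ([] : List Int))
        (z.1, st.2 ++ [z.2]))
      (0, ([] : List (List Int))))
    = (((m * d' : Nat) : Int),
       (List.range m).map (fun i =>
         (List.range d').map (fun j =>
           (((text.toList.map (fun ch => (ch.toNat : Int) - 97))[i * d' + j]?).getD 0)))) := by
  rw [PySem.List.pyRange_zero_natCast m, List.foldl_map]
  induction m with
  | zero => simp
  | succ n ih =>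
    rw [List.range_succ, List.foldl_append, ih]
    simp only [List.foldl_cons, List.foldl_nil]
    rw [inner_eq text d' (n * d') []]
    refine Prod.ext ?_ ?_
    · show ((n * d' : Nat) : Int) + (d' : Int) = (((n + 1) * d' : Nat) : Int)
      push_cast; ring
    · simp

-- ===== VERDICT (by name: the statement is the Claim_ definition above) =====
theorem text_to_numeric_spec : Claim_equal_text_to_numeric := by
  intro text dividend _ hpre
  unfold Spec_text_to_numeric text_to_numeric text_to_numeric_alt
  have hlen : PySem.Str.len text = (text.toList.length : Int) := PySem.Str.len_eq text
  set n := pyRoundDiv (PySem.Str.len text) dividend with hn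
  by_cases hle : n ≤ 0
  · rw [pyRange_nonpos n hle]
    have : n.toNat = 0 := by omega
    simp [this]
  · replace hle : 0 < n := by omega
    have hdpos : 0 < dividend := by
      rcases lt_trichotomy dividend 0 with h | h | h
      · have := pyRoundDiv_nonpos (PySem.Str.len text) dividend (by rw [hlen]; positivity) h
        rw [← hn] at this; omega
      · exact absurd h hpre
      · exact h
    obtain ⟨d', hd'⟩ : ∃ d' : Nat, dividend = (d' : Int) := ⟨dividend.toNat, by omega⟩
    obtain ⟨m, hm⟩ : ∃ m : Nat, n = (m : Int) := ⟨n.toNat, by omega⟩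
    rw [hd', hm, outer_eq text d' m]
    have hmt : ((m : Int)).toNat = m := by omega
    simp only [hmt]
    apply List.map_congr_left
    intro i _
    have h1 : (i : Int) * (d' : Int) = ((i * d' : Nat) : Int) := by push_cast; ring
    have h2 : ((i : Int) + 1) * (d' : Int) = ((i * d' : Nat) : Int) + ((d' : Nat) : Int) := by
      push_cast; ring
    rw [h1, h2, PySem.List.slice_natCast_add]
    have hrow : (List.range d').map (fun j =>
        (((text.toList.map (fun ch => (ch.toNat : Int) - 97))[i * d' + j]?).getD 0))
        = (List.range d').map (fun j =>
        ((((text.toList.map (fun ch => (ch.toNat : Int) - 97)).drop (i * d'))[j]?).getD 0)) := by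
      apply List.map_congr_left
      intro j _
      rw [List.getElem?_drop]
    rw [hrow, pad_eq]
    congr 1
    have hlenle : ((((text.toList.map (fun ch => (ch.toNat : Int) - 97)).drop (i * d')).take d').length) ≤ d' :=
      (List.length_take_le _ _)
    congr 1
    omega
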